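-- pv_equiv track=rewrite | github.com/daanvdk/MarioKrat | backend/mariokrat/schedule.py | get_next_name
-- ===== SOURCE A (Python) =====
-- def get_next_name(name):
--     # If the name is the last available for its length return the first
--     # available name that is one character longer
--     if all(char == 'Z' for char in name):
--         return 'A' * (len(name) + 1)
--
--     # Convert name from letters to a number
--     num = 0
--     for char in name:
--         num = num * 26 + ord(char) - ord('A')
--
--     num += 1
--
--     # Convert number back to letters
--     next_name = ''
--     for _ in range(len(name)):
--         num, char_code = divmod(num, 26)
--         next_name = chr(char_code + ord('A')) + next_name
--
--     return next_name
-- ===== SOURCE B (Python) =====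
-- def get_next_name(name):
--     # Last name of this length -> first name one longer
--     if name == 'Z' * len(name):
--         return 'A' * (len(name) + 1)
--     # Single right-to-left pass propagating a small carry digit
--     carry = 1
--     out = []
--     for char in reversed(name):
--         carry, r = divmod(ord(char) - ord('A') + carry, 26)
--         out.append(chr(r + ord('A')))
--     return ''.join(reversed(out))
-- ===== Notes on version B (the rewrite author's own statement) =====
-- stated objective: faster
-- what changed: Replaces A's two-pass base-26 big-integer encode/decode round trip by a single right-to-left digit pass that propagates a small carry (divmod by 26 per character), never materialising the n-digit integer.
import Mathlib
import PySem

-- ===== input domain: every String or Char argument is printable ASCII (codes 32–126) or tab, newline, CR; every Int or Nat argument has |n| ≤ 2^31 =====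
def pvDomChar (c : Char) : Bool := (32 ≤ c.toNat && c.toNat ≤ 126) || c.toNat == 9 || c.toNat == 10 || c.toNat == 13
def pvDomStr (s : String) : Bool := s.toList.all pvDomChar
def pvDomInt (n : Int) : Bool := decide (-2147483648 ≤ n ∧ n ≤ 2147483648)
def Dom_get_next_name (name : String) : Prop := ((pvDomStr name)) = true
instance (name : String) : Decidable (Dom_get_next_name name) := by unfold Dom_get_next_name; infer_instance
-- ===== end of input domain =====

-- B replaces A's base-26 big-integer encode/decode round trip by a single right-to-left
-- carry pass (objective: faster — avoids rebuilding an n-digit integer at every step).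

-- ===== PORT A =====
def get_next_name (name : String) : String :=
  let cs := name.toList
  if cs.all (fun c => c == 'Z') then
    String.mk (List.replicate (cs.length + 1) 'A')
  else
    let num : Int := cs.foldl (fun n c => n * 26 + (c.toNat : Int) - 65) 0
    let num := num + 1
    let res := (List.range cs.length).foldl
      (fun (p : Int × List Char) _ =>
        (PySem.Int.floordiv p.1 26, Char.ofNat (PySem.Int.mod p.1 26 + 65).toNat :: p.2))
      (num, [])
    String.mk res.2

-- ===== PORT B =====
-- Source B's loop over reversed(name) with `out.append` followed by ''.join(reversed(out)):
-- consing each emitted character onto the accumulator yields exactly that final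
-- (re-reversed) list, so the loop is this tail recursion and the result is `.2` directly.
def pvLoop : List Char → Int → List Char → Int × List Char
  | [], carry, out => (carry, out)
  | c :: rest, carry, out =>
      pvLoop rest (PySem.Int.floordiv ((c.toNat : Int) - 65 + carry) 26)
        (Char.ofNat ((PySem.Int.mod ((c.toNat : Int) - 65 + carry) 26) + 65).toNat :: out)

def get_next_name_alt (name : String) : String :=
  if name.toList = List.replicate name.toList.length 'Z' then
    String.mk (List.replicate (name.toList.length + 1) 'A')
  else
    String.mk (pvLoop name.toList.reverse 1 []).2

-- ===== PRECONDITION & SPEC =====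
def Spec_get_next_name (name : String) (out : String) : Prop := out = get_next_name_alt name
instance (name : String) (out : String) : Decidable (Spec_get_next_name name out) := by unfold Spec_get_next_name; infer_instance

-- ===== CLAIM (what is proved, stated in full; the proofs are below) =====
def Claim_equal_get_next_name : Prop := ∀ (name : String), Dom_get_next_name name → Spec_get_next_name name (get_next_name name)

-- ===== LEMMAS AND PROOFS =====

def pvVal (l : List Char) : Int :=
  l.foldl (fun n c => n * 26 + (c.toNat : Int) - 65) 0

def pvStep (p : Int × List Char) : Int × List Char :=
  (PySem.Int.floordiv p.1 26, Char.ofNat (PySem.Int.mod p.1 26 + 65).toNat :: p.2)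

def pvStep' (p : Int × List Char) (c : Char) : Int × List Char :=
  (PySem.Int.floordiv ((c.toNat : Int) - 65 + p.1) 26,
   Char.ofNat ((PySem.Int.mod ((c.toNat : Int) - 65 + p.1) 26) + 65).toNat :: p.2)

theorem pvLoop_eq_foldl (l : List Char) (carry : Int) (out : List Char) :
    pvLoop l carry out = l.foldl pvStep' (carry, out) := by
  induction l generalizing carry out with
  | nil => rfl
  | cons c rest ih => rw [pvLoop, List.foldl_cons]; exact ih _ _

theorem pvVal_append_singleton (t : List Char) (c : Char) :
    pvVal (t ++ [c]) = 26 * pvVal t + ((c.toNat : Int) - 65) := by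
  rw [pvVal, List.foldl_append, List.foldl_cons, List.foldl_nil]
  show pvVal t * 26 + (c.toNat : Int) - 65 = _
  ring

theorem pvDivPair (v d : Int) (h0 : 0 ≤ d) (h1 : d < 26) :
    PySem.Int.floordiv (v * 26 + d) 26 = v ∧ PySem.Int.mod (v * 26 + d) 26 = d := by
  have hf : PySem.Int.floordiv (v * 26 + d) 26 = v := by
    rw [PySem.Int.floordiv_eq_iff_of_pos (by norm_num)]
    constructor <;> nlinarith
  refine ⟨hf, ?_⟩
  have := PySem.Int.floordiv_mul_add_mod (v * 26 + d) 26
  rw [hf] at this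
  omega

theorem pvDivShift (v d : Int) :
    PySem.Int.floordiv (26 * v + d) 26 = v + PySem.Int.floordiv d 26 ∧
      PySem.Int.mod (26 * v + d) 26 = PySem.Int.mod d 26 := by
  have hmn := PySem.Int.mod_nonneg d (b := 26) (by norm_num)
  have hml := PySem.Int.mod_lt d (b := 26) (by norm_num)
  have hdm := PySem.Int.floordiv_mul_add_mod d 26
  have heq : 26 * v + d = (v + PySem.Int.floordiv d 26) * 26 + PySem.Int.mod d 26 := by
    linarith
  rw [heq]
  exact pvDivPair _ _ hmn hml

theorem pvFoldl_range_iterate (n : Nat) (init : Int × List Char) :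
    (List.range n).foldl (fun p _ => pvStep p) init = pvStep^[n] init := by
  induction n generalizing init with
  | zero => simp
  | succ k ih =>
    rw [List.range_succ, List.foldl_append, ih, List.foldl_cons, List.foldl_nil,
      Function.iterate_succ_apply']

theorem pvFoldl_out_append (m : List Char) (carry : Int) (out : List Char) :
    m.foldl pvStep' (carry, out)
      = ((m.foldl pvStep' (carry, [])).1, (m.foldl pvStep' (carry, [])).2 ++ out) := by
  induction m generalizing carry out with
  | nil => simp
  | cons c m ih =>
    rw [List.foldl_cons, List.foldl_cons]
    rw [show pvStep' (carry, out) c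
        = ((pvStep' (carry, ([] : List Char)) c).1, (pvStep' (carry, ([] : List Char)) c).2 ++ out) from rfl]
    rw [ih ((pvStep' (carry, ([] : List Char)) c).1) ((pvStep' (carry, ([] : List Char)) c).2 ++ out),
      ih ((pvStep' (carry, ([] : List Char)) c).1) ((pvStep' (carry, ([] : List Char)) c).2)]
    simp

theorem pvMain (l : List Char) (carry : Int) (acc : List Char) :
    pvStep^[l.length] (pvVal l + carry, acc)
      = ((l.reverse.foldl pvStep' (carry, [])).1,
         (l.reverse.foldl pvStep' (carry, [])).2 ++ acc) := by
  induction l using List.reverseRecOn generalizing carry acc with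
  | nil => simp [pvVal]
  | append_singleton t c ih =>
    have hd := pvDivShift (pvVal t) ((c.toNat : Int) - 65 + carry)
    have hstep : pvStep (pvVal (t ++ [c]) + carry, acc)
        = (pvVal t + PySem.Int.floordiv ((c.toNat : Int) - 65 + carry) 26,
           Char.ofNat (PySem.Int.mod ((c.toNat : Int) - 65 + carry) 26 + 65).toNat :: acc) := by
      rw [pvStep, pvVal_append_singleton]
      rw [show 26 * pvVal t + ((c.toNat : Int) - 65) + carry
          = 26 * pvVal t + ((c.toNat : Int) - 65 + carry) by ring]
      rw [hd.1, hd.2]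
    rw [List.length_append, List.length_cons, List.length_nil, Nat.zero_add,
      Function.iterate_succ_apply, hstep, ih]
    rw [List.reverse_append, List.reverse_cons, List.reverse_nil, List.nil_append,
      List.singleton_append, List.foldl_cons]
    rw [show pvStep' (carry, ([] : List Char)) c
        = (PySem.Int.floordiv ((c.toNat : Int) - 65 + carry) 26,
           [Char.ofNat (PySem.Int.mod ((c.toNat : Int) - 65 + carry) 26 + 65).toNat]) from rfl]
    have hA := pvFoldl_out_append t.reverse
      (PySem.Int.floordiv ((c.toNat : Int) - 65 + carry) 26)
      [Char.ofNat (PySem.Int.mod ((c.toNat : Int) - 65 + carry) 26 + 65).toNat]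
    rw [hA]
    simp

-- A's guard `all chars == 'Z'` and B's guard `name == 'Z' * len(name)` agree.
theorem pvAllZ_iff (l : List Char) :
    (l.all (fun c => c == 'Z') = true) ↔ l = List.replicate l.length 'Z' := by
  rw [List.all_eq_true, List.eq_replicate_length]
  simp

-- ===== VERDICT (by name: the statement is the Claim_ definition above) =====
theorem get_next_name_spec : Claim_equal_get_next_name := by
  intro name _
  unfold Spec_get_next_name get_next_name get_next_name_alt
  cases h : name.toList.all (fun c => c == 'Z') with
  | true =>
    have hz := (pvAllZ_iff name.toList).mp h
    rw [if_pos h, if_pos hz]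
  | false =>
    have hz : ¬ name.toList = List.replicate name.toList.length 'Z' := by
      intro hc; rw [← pvAllZ_iff] at hc; rw [hc] at h; cases h
    simp only [h, Bool.false_eq_true, if_false, hz]
    rw [show (fun (p : Int × List Char) _ =>
        (PySem.Int.floordiv p.1 26, Char.ofNat (PySem.Int.mod p.1 26 + 65).toNat :: p.2))
        = (fun p (_ : Nat) => pvStep p) from rfl,
      pvFoldl_range_iterate]
    rw [show name.toList.foldl (fun n c => n * 26 + (c.toNat : Int) - 65) 0
        = pvVal name.toList from rfl]
    rw [pvLoop_eq_foldl, pvMain name.toList 1 []]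
    simp
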